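-- pv_equiv track=rewrite | github.com/kacperpradzynski/Big-data | Task_2/main.py | connect_friends
-- ===== SOURCE A (Python) =====
-- import itertools
--
-- def connect_friends(user_friends):
--     connections = []
--     user = user_friends[0]
--     friends = user_friends[1]
--     for friend in friends:
--         key = tuple(sorted((user, friend)))
--         connections.append((key, 0))
--     for pairs in itertools.combinations(friends, 2):
--         key = tuple(sorted((pairs[0], pairs[1])))
--         connections.append((key, 1))
--     return connections
-- ===== SOURCE B (Python) =====
-- def connect_friends(user_friends):
--     members = [user_friends[0], *user_friends[1]]
--     out = []
--     tag = 0
--     while len(members) > 1: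
--         head, *members = members
--         for other in members:
--             out.append(((head, other) if head <= other else (other, head), tag))
--         tag = 1
--     return out
-- ===== Notes on version B (the rewrite author's own statement) =====
-- stated objective: simpler
-- what changed: Replaces A's two separate loops (friend loop plus itertools.combinations) with one peeling loop over [user]+friends that pairs the current head with every remaining member, the tag switching from 0 to 1 after the first round.
import Mathlib
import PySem

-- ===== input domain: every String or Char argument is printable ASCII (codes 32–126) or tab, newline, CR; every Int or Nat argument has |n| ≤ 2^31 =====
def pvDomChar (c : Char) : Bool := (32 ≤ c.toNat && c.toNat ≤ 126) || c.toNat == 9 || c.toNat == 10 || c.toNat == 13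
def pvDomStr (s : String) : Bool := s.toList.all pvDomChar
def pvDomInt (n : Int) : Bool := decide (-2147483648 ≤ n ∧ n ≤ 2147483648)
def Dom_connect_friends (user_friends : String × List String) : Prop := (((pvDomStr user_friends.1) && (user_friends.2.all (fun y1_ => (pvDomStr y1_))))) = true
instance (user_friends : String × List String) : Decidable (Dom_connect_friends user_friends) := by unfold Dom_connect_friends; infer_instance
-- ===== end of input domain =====

-- B replaces A's two loops (friend loop + itertools.combinations) by one peeling loop over
-- [user]+friends whose tag switches from 0 to 1 after the first round (objective: simpler).

-- ===== PORT A =====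
-- tuple(sorted((a, b))): PySem stable sort of the 2-element list, repacked as a pair
-- (the catch-all branch is unreachable: sorting a 2-list yields a 2-list).
def keyA (a b : String) : String × String :=
  match PySem.List.sorted [a, b] (fun x => x) false with
  | [x, y] => (x, y)
  | _ => (a, b)

-- hand port of itertools.combinations(xs, 2): pairs (xs[i], xs[j]) for i < j, in Python's order (exact for r = 2)
def combos2 : List String → List (String × String)
  | [] => []
  | x :: xs => xs.map (fun y => (x, y)) ++ combos2 xs

def connect_friends (user_friends : String × List String) : List ((String × String) × Int) :=
  let user := user_friends.1
  let friends := user_friends.2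
  let connections := friends.foldl (fun acc friend => acc ++ [(keyA user friend, (0 : Int))]) []
  (combos2 friends).foldl (fun acc pairs => acc ++ [(keyA pairs.1 pairs.2, (1 : Int))]) connections

-- ===== PORT B =====
-- while len(members) > 1: head, *members = members; pair head with each remaining member
def altGo : List String → Int → List ((String × String) × Int) → List ((String × String) × Int)
  | [], _, out => out
  | [_], _, out => out
  | head :: members, tag, out =>
      altGo members 1
        (out ++ members.map (fun other =>
          ((if head ≤ other then (head, other) else (other, head)), tag)))

def connect_friends_alt (user_friends : String × List String) : List ((String × String) × Int) :=
  altGo (user_friends.1 :: user_friends.2) 0 []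

-- ===== PRECONDITION & SPEC =====
def Spec_connect_friends (user_friends : String × List String) (out : List ((String × String) × Int)) : Prop := out = connect_friends_alt user_friends
instance (user_friends : String × List String) (out : List ((String × String) × Int)) : Decidable (Spec_connect_friends user_friends out) := by unfold Spec_connect_friends; infer_instance

-- ===== CLAIM (what is proved, stated in full; the proofs are below) =====
def Claim_equal_connect_friends : Prop := ∀ (user_friends : String × List String), Dom_connect_friends user_friends → Spec_connect_friends user_friends (connect_friends user_friends)

-- ===== LEMMAS AND PROOFS =====

theorem altGo_cons (head m : String) (ms : List String) (tag : Int)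
    (out : List ((String × String) × Int)) :
    altGo (head :: m :: ms) tag out =
      altGo (m :: ms) 1
        (out ++ (m :: ms).map (fun other =>
          ((if head ≤ other then (head, other) else (other, head)), tag))) := rfl

theorem keyA_eq (a b : String) : keyA a b = if a ≤ b then (a, b) else (b, a) := by
  unfold keyA
  by_cases h : a ≤ b
  · have : PySem.List.sorted [a, b] (fun x => x) false = [a, b] :=
      PySem.List.sorted_eq_self_of_pairwise [a, b] (fun x => x)
        (by simp [String.le_iff_toList_le.mp h])
    simp [this, h]
  · rw [not_le] at h
    have : PySem.List.sorted [a, b] (fun x => x) false = [b, a] :=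
      PySem.List.sorted_eq_of_perm_of_pairwise_lt [a, b] [b, a] (fun x => x) (List.Perm.swap a b [])
        (by simp [String.lt_iff_toList_lt.mp h])
    simp [this, not_le.mpr h]

theorem foldl_append_map {α β : Type} (f : α → β) :
    ∀ (l : List α) (acc : List β),
      l.foldl (fun acc x => acc ++ [f x]) acc = acc ++ l.map f := by
  intro l
  induction l with
  | nil => simp
  | cons x xs ih => intro acc; simp [List.foldl, ih]

theorem altGo_one :
    ∀ (ms : List String) (acc : List ((String × String) × Int)),
      altGo ms 1 acc = acc ++ (combos2 ms).map (fun p => (keyA p.1 p.2, (1 : Int))) := by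
  intro ms
  induction ms with
  | nil => intro acc; simp [altGo, combos2]
  | cons h t ih =>
    intro acc
    cases t with
    | nil => simp [altGo, combos2]
    | cons y ys =>
      rw [altGo_cons, ih]
      simp [combos2, keyA_eq, List.map_map, Function.comp]

theorem connect_friends_spec : Claim_equal_connect_friends := by
  intro uf _
  unfold Spec_connect_friends connect_friends connect_friends_alt
  obtain ⟨u, fs⟩ := uf
  cases fs with
  | nil => simp [altGo, combos2]
  | cons f fs =>
    rw [altGo_cons, altGo_one, foldl_append_map, foldl_append_map]
    simp [keyA_eq]
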